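-- pv_equiv track=rewrite | github.com/mcgillies/mlb-data | src/mlb_data/teams.py | get_division
-- ===== SOURCE A (Python) =====
-- def get_division(abbrev: str) -> str | None:
--     """Get division for a team."""
--     divisions = {
--         'AL East': ['BAL', 'BOS', 'NYY', 'TBR', 'TOR'],
--         'AL Central': ['CHW', 'CLE', 'DET', 'KCR', 'MIN'],
--         'AL West': ['HOU', 'LAA', 'OAK', 'SEA', 'TEX'],
--         'NL East': ['ATL', 'MIA', 'NYM', 'PHI', 'WSN'],
--         'NL Central': ['CHC', 'CIN', 'MIL', 'PIT', 'STL'],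
--         'NL West': ['ARI', 'COL', 'LAD', 'SDP', 'SFG'],
--     }
--
--     for division, teams in divisions.items():
--         if abbrev.upper() in teams:
--             return division
--     return None
-- ===== SOURCE B (Python) =====
-- _TEAM_DIVISION = {
--     'BAL': 'AL East', 'BOS': 'AL East', 'NYY': 'AL East', 'TBR': 'AL East', 'TOR': 'AL East',
--     'CHW': 'AL Central', 'CLE': 'AL Central', 'DET': 'AL Central', 'KCR': 'AL Central', 'MIN': 'AL Central',
--     'HOU': 'AL West', 'LAA': 'AL West', 'OAK': 'AL West', 'SEA': 'AL West', 'TEX': 'AL West',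
--     'ATL': 'NL East', 'MIA': 'NL East', 'NYM': 'NL East', 'PHI': 'NL East', 'WSN': 'NL East',
--     'CHC': 'NL Central', 'CIN': 'NL Central', 'MIL': 'NL Central', 'PIT': 'NL Central', 'STL': 'NL Central',
--     'ARI': 'NL West', 'COL': 'NL West', 'LAD': 'NL West', 'SDP': 'NL West', 'SFG': 'NL West',
-- }
--
--
-- def get_division(abbrev: str) -> str | None:
--     """Get division for a team."""
--     return _TEAM_DIVISION.get(abbrev.upper())
-- ===== Notes on version B (the rewrite author's own statement) =====
-- stated objective: idiomatic
-- what changed: Replaces the per-division scan (loop over the divisions dict with a membership test in each team list) by a flat module-level team-to-division dict literal answered with a single .get lookup; the loop and the nested team lists disappear entirely.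
import Mathlib
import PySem

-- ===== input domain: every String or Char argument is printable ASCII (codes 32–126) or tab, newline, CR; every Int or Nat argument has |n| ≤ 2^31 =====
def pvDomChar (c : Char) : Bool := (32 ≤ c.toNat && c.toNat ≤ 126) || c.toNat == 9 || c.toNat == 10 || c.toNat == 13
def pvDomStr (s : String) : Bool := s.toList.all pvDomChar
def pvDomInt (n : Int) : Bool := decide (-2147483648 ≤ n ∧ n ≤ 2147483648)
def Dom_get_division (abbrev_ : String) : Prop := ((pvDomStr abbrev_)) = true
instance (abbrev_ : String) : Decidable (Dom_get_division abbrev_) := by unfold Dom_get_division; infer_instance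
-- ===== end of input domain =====

-- B drops A's loop over divisions with a per-list membership test and instead
-- answers from a flat team→division dict literal with one lookup (idiomatic).

-- ===== PORT A =====
-- the literal `divisions` dict of A, as an insertion-ordered association list
def pvDivisionsA : List (String × List String) :=
  [("AL East", ["BAL", "BOS", "NYY", "TBR", "TOR"]),
   ("AL Central", ["CHW", "CLE", "DET", "KCR", "MIN"]),
   ("AL West", ["HOU", "LAA", "OAK", "SEA", "TEX"]),
   ("NL East", ["ATL", "MIA", "NYM", "PHI", "WSN"]),
   ("NL Central", ["CHC", "CIN", "MIL", "PIT", "STL"]),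
   ("NL West", ["ARI", "COL", "LAD", "SDP", "SFG"])]

-- A's `for division, teams in divisions.items(): if abbrev.upper() in teams: return division`
def pvScanA (divs : List (String × List String)) (abbrev_ : String) : Option String :=
  match divs with
  | [] => none
  | (division, teams) :: rest =>
      if teams.contains (PySem.Str.upper abbrev_) then some division
      else pvScanA rest abbrev_

def get_division (abbrev_ : String) : Option String :=
  pvScanA pvDivisionsA abbrev_

-- ===== PORT B =====
-- the module-level flat dict literal `_TEAM_DIVISION` of Source B
def pvTeamDivision : PySem.Dict String String :=
  PySem.Dict.ofList
    [("BAL", "AL East"), ("BOS", "AL East"), ("NYY", "AL East"), ("TBR", "AL East"), ("TOR", "AL East"),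
     ("CHW", "AL Central"), ("CLE", "AL Central"), ("DET", "AL Central"), ("KCR", "AL Central"), ("MIN", "AL Central"),
     ("HOU", "AL West"), ("LAA", "AL West"), ("OAK", "AL West"), ("SEA", "AL West"), ("TEX", "AL West"),
     ("ATL", "NL East"), ("MIA", "NL East"), ("NYM", "NL East"), ("PHI", "NL East"), ("WSN", "NL East"),
     ("CHC", "NL Central"), ("CIN", "NL Central"), ("MIL", "NL Central"), ("PIT", "NL Central"), ("STL", "NL Central"),
     ("ARI", "NL West"), ("COL", "NL West"), ("LAD", "NL West"), ("SDP", "NL West"), ("SFG", "NL West")]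

-- `_TEAM_DIVISION.get(abbrev.upper())`
def get_division_alt (abbrev_ : String) : Option String :=
  pvTeamDivision.get? (PySem.Str.upper abbrev_)

-- ===== PRECONDITION & SPEC =====
def Spec_get_division (abbrev_ : String) (out : Option String) : Prop := out = get_division_alt abbrev_
instance (abbrev_ : String) (out : Option String) : Decidable (Spec_get_division abbrev_ out) := by unfold Spec_get_division; infer_instance

-- ===== CLAIM (what is proved, stated in full; the proofs are below) =====
def Claim_equal_get_division : Prop := ∀ (abbrev_ : String), Dom_get_division abbrev_ → Spec_get_division abbrev_ (get_division abbrev_)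

-- ===== LEMMAS AND PROOFS =====

-- one division's flattened block: looking up u in (teams.map (·, d)) ++ rest is
-- the membership test followed by the lookup in the rest
theorem pv_block_lookup (u d : String) (teams : List String)
    (rest : List (String × String)) :
    (PySem.Dict.mk (teams.map (fun t => (t, d)) ++ rest)).get? u
      = if teams.contains u then some d else (PySem.Dict.mk rest).get? u := by
  induction teams with
  | nil => simp
  | cons t ts ih =>
      simp only [List.map_cons, List.cons_append, PySem.Dict.get?_mk_cons, ih,
        List.contains_cons]
      by_cases h : t = u
      · subst h; simp
      · simp [h, Ne.symm h, BEq.symm_false]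

-- A's scan over any division table equals lookup in the flattened pair list
theorem pv_scan_eq_flat (divs : List (String × List String)) (abbrev_ : String) :
    pvScanA divs abbrev_
      = (PySem.Dict.mk (divs.flatMap (fun p => p.2.map (fun team => (team, p.1))))).get?
          (PySem.Str.upper abbrev_) := by
  induction divs with
  | nil => simp [pvScanA, PySem.Dict.get?]
  | cons p rest ih =>
      obtain ⟨d, teams⟩ := p
      simp only [pvScanA, List.flatMap_cons, pv_block_lookup, ih]

-- B's flat dict literal (overwrite semantics over 30 distinct keys) is exactly
-- A's table flattened into a pair list
theorem pv_flat_eq_mk :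
    pvTeamDivision
      = PySem.Dict.mk (pvDivisionsA.flatMap (fun p => p.2.map (fun team => (team, p.1)))) := by
  decide

-- ===== VERDICT (by name: the statement is the Claim_ definition above) =====
theorem get_division_spec : Claim_equal_get_division := by
  intro abbrev_ _
  unfold Spec_get_division get_division get_division_alt
  rw [pv_scan_eq_flat, pv_flat_eq_mk]
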